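-- pv_equiv track=rewrite | github.com/yongsun-yoon/language-model-dataset | hfdataset.py | get_token_type_ids
-- ===== SOURCE A (Python) =====
-- def get_token_type_ids(input_ids, sep_token_id):
--     token_type_ids = []
--
--     curr = 0
--     for i in input_ids:
--         token_type_ids.append(curr)
--         if i == sep_token_id:
--             curr = 1 - curr
--
--     return token_type_ids
-- ===== SOURCE B (Python) =====
-- def get_token_type_ids(input_ids, sep_token_id):
--     # Stage 1: indicator of separator tokens
--     indicators = [1 if t == sep_token_id else 0 for t in input_ids]
--     # Stage 2: prefix sums = number of separators strictly before each position
--     before = []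
--     total = 0
--     for x in indicators:
--         before.append(total)
--         total += x
--     # Stage 3: parity of that count is the token type id
--     return [c % 2 for c in before]
-- ===== Notes on version B (the rewrite author's own statement) =====
-- stated objective: alternative
-- what changed: Replaces the single toggling loop (curr flipped at each separator) by a three-stage pipeline: separator indicator list, prefix-sum of separators strictly before each position, then parity (mod 2) of each count.
import Mathlib
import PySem

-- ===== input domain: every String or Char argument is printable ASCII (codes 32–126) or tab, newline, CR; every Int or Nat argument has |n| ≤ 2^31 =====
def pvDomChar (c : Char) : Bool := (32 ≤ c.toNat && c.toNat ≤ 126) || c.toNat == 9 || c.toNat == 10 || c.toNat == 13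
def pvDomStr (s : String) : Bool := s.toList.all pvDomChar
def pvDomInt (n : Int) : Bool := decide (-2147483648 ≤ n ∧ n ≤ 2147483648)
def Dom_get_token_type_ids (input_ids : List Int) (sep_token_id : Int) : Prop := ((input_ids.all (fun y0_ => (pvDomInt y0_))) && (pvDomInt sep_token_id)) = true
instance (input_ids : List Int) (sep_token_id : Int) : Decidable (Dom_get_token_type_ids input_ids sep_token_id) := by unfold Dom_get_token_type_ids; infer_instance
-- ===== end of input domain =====

-- B replaces A's single toggling loop by a three-stage pipeline (separator indicator,
-- prefix count of separators before each position, parity map); objective: alternative.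


-- ===== PORT A =====
-- A's for-loop over input_ids with state (token_type_ids, curr), as a foldl.
def get_token_type_ids (input_ids : List Int) (sep_token_id : Int) : List Int :=
  (input_ids.foldl
    (fun (st : List Int × Int) i =>
      (st.1 ++ [st.2], if i = sep_token_id then 1 - st.2 else st.2))
    ([], 0)).1

-- ===== PORT B =====
-- Stage 1: indicator list (list comprehension → map).
def pvIndicators (input_ids : List Int) (sep_token_id : Int) : List Int :=
  input_ids.map (fun t => if t = sep_token_id then 1 else 0)

-- Stage 2: prefix-sum loop with state (before, total), as a foldl.
def pvBefore (ind : List Int) : List Int :=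
  (ind.foldl (fun (st : List Int × Int) x => (st.1 ++ [st.2], st.2 + x)) ([], 0)).1

def get_token_type_ids_alt (input_ids : List Int) (sep_token_id : Int) : List Int :=
  -- Stage 3: parity map; 'c % 2' ported as PySem.Int.mod c 2 (Python's %).
  (pvBefore (pvIndicators input_ids sep_token_id)).map (fun c => PySem.Int.mod c 2)

-- ===== PRECONDITION & SPEC =====
def Spec_get_token_type_ids (input_ids : List Int) (sep_token_id : Int) (out : List Int) : Prop := out = get_token_type_ids_alt input_ids sep_token_id
instance (input_ids : List Int) (sep_token_id : Int) (out : List Int) : Decidable (Spec_get_token_type_ids input_ids sep_token_id out) := by unfold Spec_get_token_type_ids; infer_instance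

-- ===== CLAIM (what is proved, stated in full; the proofs are below) =====
def Claim_equal_get_token_type_ids : Prop := ∀ (input_ids : List Int) (sep_token_id : Int), Dom_get_token_type_ids input_ids sep_token_id → Spec_get_token_type_ids input_ids sep_token_id (get_token_type_ids input_ids sep_token_id)

-- ===== LEMMAS AND PROOFS =====

-- A's loop with the accumulator list pulled out front.
theorem aLoop_out (sep : Int) (ids : List Int) (out : List Int) (curr : Int) :
    (ids.foldl (fun (st : List Int × Int) i =>
      (st.1 ++ [st.2], if i = sep then 1 - st.2 else st.2)) (out, curr)).1
    = out ++ (ids.foldl (fun (st : List Int × Int) i =>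
      (st.1 ++ [st.2], if i = sep then 1 - st.2 else st.2)) ([], curr)).1 := by
  induction ids generalizing out curr with
  | nil => simp
  | cons i rest ih =>
    simp only [List.foldl_cons, List.nil_append]
    rw [ih, ih [curr]]
    simp

-- B's prefix-sum loop with the accumulator list pulled out front.
theorem bLoop_out (ind : List Int) (out : List Int) (total : Int) :
    (ind.foldl (fun (st : List Int × Int) x => (st.1 ++ [st.2], st.2 + x)) (out, total)).1
    = out ++ (ind.foldl (fun (st : List Int × Int) x => (st.1 ++ [st.2], st.2 + x)) ([], total)).1 := by
  induction ind generalizing out total with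
  | nil => simp
  | cons x rest ih =>
    simp only [List.foldl_cons, List.nil_append]
    rw [ih, ih [total]]
    simp

theorem pymod_two (c : Int) : PySem.Int.mod c 2 = c % 2 :=
  PySem.Int.mod_eq_emod_of_pos (by norm_num)

-- Main invariant: A's toggling loop started at parity c % 2 equals the parity map of
-- B's prefix sums started at count c.
theorem main_inv (sep : Int) (ids : List Int) (c : Int) (hc : 0 ≤ c) :
    (ids.foldl (fun (st : List Int × Int) i =>
      (st.1 ++ [st.2], if i = sep then 1 - st.2 else st.2)) ([], c % 2)).1
    = ((ids.map (fun t => if t = sep then (1:Int) else 0)).foldl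
        (fun (st : List Int × Int) x => (st.1 ++ [st.2], st.2 + x)) ([], c)).1.map
        (fun c => PySem.Int.mod c 2) := by
  induction ids generalizing c with
  | nil => simp
  | cons i rest ih =>
    simp only [List.map_cons, List.foldl_cons, List.nil_append]
    rw [aLoop_out sep rest [c % 2], bLoop_out _ [c]]
    simp only [List.map_append, List.map_cons, List.map_nil]
    rw [pymod_two c]
    by_cases h : i = sep
    · have h1 : (1 : Int) - c % 2 = (c + 1) % 2 := by omega
      simp only [h, if_true, h1]
      rw [ih (c + 1) (by omega)]
    · simp only [if_neg h, add_zero]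
      rw [ih c hc]

-- ===== VERDICT (by name: the statement is the Claim_ definition above) =====
theorem get_token_type_ids_spec : Claim_equal_get_token_type_ids := by
  intro input_ids sep_token_id _
  show _ = _
  unfold get_token_type_ids get_token_type_ids_alt pvBefore pvIndicators
  have := main_inv sep_token_id input_ids 0 (le_refl 0)
  simpa using this
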